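-- pv_equiv track=rewrite | github.com/FlorentinGuth/PhaseCollapse | main_block.py | parse_architecture
-- ===== SOURCE A (Python) =====
-- model_names = ['scatnetblockanalysis', 'scatnetblock', 'blockanalysis', 'stft', 'stftblock', 'stftblockanalysis',
--                'dct', 'dctblock', 'dctblockanalysis', 'hidden_layer']
--
-- module_names = ["Fw", "B", "R", "C", "mod", "rho", "Std", "P", "Pr", "Pc", "N", "FrhoF", "STFT", "DCT", "HL", "id"]
--
-- def parse_architecture(arch):
--     if arch in model_names:  # Predefined architectures
--         block = []
--
--         if 'scat' in arch:
--             block.append('Fw')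
--             block.append('rho')
--         elif 'stft' in arch:
--             block.append('STFT')
--             block.append('rho')
--         elif 'dct' in arch:
--             block.append('DCT')
--             block.append('rho')
--         elif arch == 'hidden_layer':
--             block.append('HL')
--
--         if 'block' in arch:
--             block.append('Std')
--             block.append('P')
--             block.append('N')
--
--         if 'analysis' in arch:
--             block.append('FrhoF')
--     else:
--         block = arch.split()
--
--     assert all(module in module_names for module in block)
--     return block
-- ===== SOURCE B (Python) =====
-- model_names = ['scatnetblockanalysis', 'scatnetblock', 'blockanalysis', 'stft', 'stftblock', 'stftblockanalysis',
--                'dct', 'dctblock', 'dctblockanalysis', 'hidden_layer']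
--
-- module_names = ["Fw", "B", "R", "C", "mod", "rho", "Std", "P", "Pr", "Pc", "N", "FrhoF", "STFT", "DCT", "HL", "id"]
--
-- # Precomputed table: each predefined architecture name -> its exact block list.
-- _TABLE = {
--     'scatnetblockanalysis': ['Fw', 'rho', 'Std', 'P', 'N', 'FrhoF'],
--     'scatnetblock':         ['Fw', 'rho', 'Std', 'P', 'N'],
--     'blockanalysis':        ['Std', 'P', 'N', 'FrhoF'],
--     'stft':                 ['STFT', 'rho'],
--     'stftblock':            ['STFT', 'rho', 'Std', 'P', 'N'],
--     'stftblockanalysis':    ['STFT', 'rho', 'Std', 'P', 'N', 'FrhoF'],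
--     'dct':                  ['DCT', 'rho'],
--     'dctblock':             ['DCT', 'rho', 'Std', 'P', 'N'],
--     'dctblockanalysis':     ['DCT', 'rho', 'Std', 'P', 'N', 'FrhoF'],
--     'hidden_layer':         ['HL'],
-- }
--
-- def parse_architecture(arch):
--     stored = _TABLE.get(arch)
--     block = list(stored) if stored is not None else arch.split()
--     assert all(module in module_names for module in block)
--     return block
-- ===== Notes on version B (the rewrite author's own statement) =====
-- stated objective: simpler
-- what changed: Replaces the branch cascade with its four substring tests by a precomputed dict mapping each of the 10 model names to its exact block list (copied per call), with the split fallback and the assert kept.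
import Mathlib
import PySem

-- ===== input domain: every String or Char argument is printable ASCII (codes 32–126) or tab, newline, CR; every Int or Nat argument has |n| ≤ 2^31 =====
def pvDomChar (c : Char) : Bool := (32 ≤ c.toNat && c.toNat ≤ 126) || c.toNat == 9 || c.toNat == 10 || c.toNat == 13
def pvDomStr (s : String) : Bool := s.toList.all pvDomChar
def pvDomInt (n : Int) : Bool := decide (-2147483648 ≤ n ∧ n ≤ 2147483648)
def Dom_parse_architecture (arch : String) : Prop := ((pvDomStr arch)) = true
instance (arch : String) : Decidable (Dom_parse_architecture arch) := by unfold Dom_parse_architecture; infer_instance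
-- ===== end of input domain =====

-- B replaces A's branch cascade by a precomputed name -> block-list table; objective: simpler.

-- ===== PORT A =====
def pvModelNames : List String :=
  ["scatnetblockanalysis", "scatnetblock", "blockanalysis", "stft", "stftblock", "stftblockanalysis",
   "dct", "dctblock", "dctblockanalysis", "hidden_layer"]

def pvModuleNames : List String :=
  ["Fw", "B", "R", "C", "mod", "rho", "Std", "P", "Pr", "Pc", "N", "FrhoF", "STFT", "DCT", "HL", "id"]

def parse_architecture (arch : String) : List String :=
  if pvModelNames.contains arch then
    let block : List String := []
    let block :=
      if PySem.Str.isIn "scat" arch then block ++ ["Fw", "rho"]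
      else if PySem.Str.isIn "stft" arch then block ++ ["STFT", "rho"]
      else if PySem.Str.isIn "dct" arch then block ++ ["DCT", "rho"]
      else if arch == "hidden_layer" then block ++ ["HL"]
      else block
    let block := if PySem.Str.isIn "block" arch then block ++ ["Std", "P", "N"] else block
    let block := if PySem.Str.isIn "analysis" arch then block ++ ["FrhoF"] else block
    block
  else
    PySem.Str.split₀ arch
  -- the final 'assert' raises exactly where some module is outside module_names; Pre_ excludes those inputs

-- ===== PORT B =====
def pvTable : PySem.Dict String (List String) :=
  PySem.Dict.mk
    [("scatnetblockanalysis", ["Fw", "rho", "Std", "P", "N", "FrhoF"]),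
     ("scatnetblock",         ["Fw", "rho", "Std", "P", "N"]),
     ("blockanalysis",        ["Std", "P", "N", "FrhoF"]),
     ("stft",                 ["STFT", "rho"]),
     ("stftblock",            ["STFT", "rho", "Std", "P", "N"]),
     ("stftblockanalysis",    ["STFT", "rho", "Std", "P", "N", "FrhoF"]),
     ("dct",                  ["DCT", "rho"]),
     ("dctblock",             ["DCT", "rho", "Std", "P", "N"]),
     ("dctblockanalysis",     ["DCT", "rho", "Std", "P", "N", "FrhoF"]),
     ("hidden_layer",         ["HL"])]

def parse_architecture_alt (arch : String) : List String :=
  match pvTable.get? arch with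
  | some stored => stored
  | none => PySem.Str.split₀ arch
  -- the final 'assert' raises exactly where some module is outside module_names; Pre_ excludes those inputs

-- ===== PRECONDITION & SPEC =====
-- Pre_ excludes exactly the inputs where the 'assert' fails: both A and B raise AssertionError there.
def Pre_parse_architecture (arch : String) : Prop :=
  arch ∈ pvModelNames ∨ ∀ m ∈ PySem.Str.split₀ arch, m ∈ pvModuleNames
instance (arch : String) : Decidable (Pre_parse_architecture arch) := by
  unfold Pre_parse_architecture; infer_instance

def pvWitness_parse_architecture : String := "stftblock"

def Spec_parse_architecture (arch : String) (out : List String) : Prop := out = parse_architecture_alt arch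
instance (arch : String) (out : List String) : Decidable (Spec_parse_architecture arch out) := by unfold Spec_parse_architecture; infer_instance

-- ===== CLAIM (what is proved, stated in full; the proofs are below) =====
def Claim_equal_parse_architecture : Prop := ∀ (arch : String), Dom_parse_architecture arch → Pre_parse_architecture arch → Spec_parse_architecture arch (parse_architecture arch)

-- ===== LEMMAS AND PROOFS =====

-- When arch is not a model name, the table lookup misses and both sides split.
theorem pvTable_get?_none (arch : String) (h : arch ∉ pvModelNames) :
    pvTable.get? arch = none := by
  simp only [pvModelNames, List.mem_cons, List.not_mem_nil, or_false, not_or] at h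
  obtain ⟨h1, h2, h3, h4, h5, h6, h7, h8, h9, h10⟩ := h
  simp [pvTable, PySem.Dict.get?,
    Ne.symm h1, Ne.symm h2, Ne.symm h3, Ne.symm h4, Ne.symm h5,
    Ne.symm h6, Ne.symm h7, Ne.symm h8, Ne.symm h9, Ne.symm h10]

-- ===== VERDICT (by name: the statement is the Claim_ definition above) =====
theorem parse_architecture_spec : Claim_equal_parse_architecture := by
  intro arch _ _
  unfold Spec_parse_architecture
  by_cases h : arch ∈ pvModelNames
  · simp only [pvModelNames, List.mem_cons, List.not_mem_nil, or_false] at h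
    rcases h with h | h | h | h | h | h | h | h | h | h <;> subst h <;> decide
  · unfold parse_architecture parse_architecture_alt
    rw [pvTable_get?_none arch h]
    simp [List.contains_eq_mem, h]
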